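-- pv_equiv track=rewrite | github.com/delfinaronco/algoritmos-1 | Guia7denuevo.py | filas_ordenadas
-- ===== SOURCE A (Python) =====
-- def ordenados (s:list) -> bool:
--     for i in range(len(s)-1):
--         if not (s[i] <= s[i+1]):
--             return False
--
--     return True
--
-- def filas_ordenadas (matriz: list) -> list:
--     res: list = []
--
--     for fila in matriz:
--         if not ordenados(fila):
--             res.append(False)
--         else:
--             res.append(True)
--
--     return res
-- ===== SOURCE B (Python) =====
-- def filas_ordenadas(matriz: list) -> list:
--     return [fila == sorted(fila) for fila in matriz]
-- ===== Notes on version B (the rewrite author's own statement) =====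
-- stated objective: simpler
-- what changed: Replaces the per-row adjacent-pair scan with early return by a one-line sort-and-compare: each row is equal to its sorted copy iff it is ordered.
import Mathlib
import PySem

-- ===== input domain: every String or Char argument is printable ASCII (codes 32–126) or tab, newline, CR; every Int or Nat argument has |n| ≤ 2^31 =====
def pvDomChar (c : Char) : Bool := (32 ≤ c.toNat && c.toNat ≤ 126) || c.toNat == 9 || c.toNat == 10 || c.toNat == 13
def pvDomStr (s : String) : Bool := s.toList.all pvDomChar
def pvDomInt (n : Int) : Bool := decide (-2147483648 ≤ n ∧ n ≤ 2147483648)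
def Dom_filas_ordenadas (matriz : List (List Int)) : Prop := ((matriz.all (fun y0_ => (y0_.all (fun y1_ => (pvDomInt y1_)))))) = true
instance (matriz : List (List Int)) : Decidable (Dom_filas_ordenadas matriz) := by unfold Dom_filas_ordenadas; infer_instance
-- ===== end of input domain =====

-- B replaces A's per-row adjacent-pair scan (with early return) by a one-line
-- sort-and-compare: a row is ordered iff it equals its sorted copy (objective: simpler).

-- ===== PORT A =====
-- the 'for i in range(len(s)-1)' loop of 'ordenados', with early return False
-- (indices i and i+1 are always in range here, so pyGetD is exact)
def ordLoop (s : List Int) : List Int → Bool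
  | [] => true
  | i :: rest =>
    if ¬ (PySem.List.pyGetD s i 0 ≤ PySem.List.pyGetD s (i + 1) 0) then false
    else ordLoop s rest

def ordenados (s : List Int) : Bool :=
  ordLoop s (PySem.List.pyRange 0 ((s.length : Int) - 1) 1)

def filas_ordenadas (matriz : List (List Int)) : List Bool :=
  matriz.foldl (fun res fila =>
    if ¬ (ordenados fila) then res ++ [false] else res ++ [true]) []

-- ===== PORT B =====
def filas_ordenadas_alt (matriz : List (List Int)) : List Bool :=
  matriz.map (fun fila => decide (fila = PySem.List.sorted fila (fun x => x) false))

-- ===== PRECONDITION & SPEC =====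
def Spec_filas_ordenadas (matriz : List (List Int)) (out : List Bool) : Prop := out = filas_ordenadas_alt matriz
instance (matriz : List (List Int)) (out : List Bool) : Decidable (Spec_filas_ordenadas matriz out) := by unfold Spec_filas_ordenadas; infer_instance

-- ===== CLAIM (what is proved, stated in full; the proofs are below) =====
def Claim_equal_filas_ordenadas : Prop := ∀ (matriz : List (List Int)), Dom_filas_ordenadas matriz → Spec_filas_ordenadas matriz (filas_ordenadas matriz)

-- ===== LEMMAS AND PROOFS =====

theorem ordLoop_eq_all (s : List Int) (L : List Int) :
    ordLoop s L = L.all (fun i => PySem.List.pyGetD s i 0 ≤ PySem.List.pyGetD s (i + 1) 0) := by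
  induction L with
  | nil => rfl
  | cons i rest ih =>
    simp only [ordLoop, List.all_cons, ih]
    by_cases h : PySem.List.pyGetD s i 0 ≤ PySem.List.pyGetD s (i + 1) 0 <;> simp [h]

theorem ordenados_iff_chain' (s : List Int) :
    ordenados s = true ↔ List.IsChain (· ≤ ·) s := by
  rw [ordenados, ordLoop_eq_all, List.all_eq_true, List.isChain_iff_getElem]
  constructor
  · intro h k hk
    have hm : (k : Int) ∈ PySem.List.pyRange 0 ((s.length : Int) - 1) 1 := by
      rw [PySem.List.mem_pyRange_one]; omega
    have h1 := h _ hm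
    have h2 : ((k : Int) + 1) = ((k + 1 : Nat) : Int) := by push_cast; ring
    rw [h2, PySem.List.pyGetD_natCast, PySem.List.pyGetD_natCast,
      List.getD_eq_getElem s 0 (by omega), List.getD_eq_getElem s 0 (by omega)] at h1
    exact of_decide_eq_true h1
  · intro h i hi
    rw [PySem.List.mem_pyRange_one] at hi
    have hik : i = ((i.toNat : Nat) : Int) := by omega
    have h2 : ((i.toNat : Nat) : Int) + 1 = ((i.toNat + 1 : Nat) : Int) := by push_cast; ring
    rw [hik, PySem.List.pyGetD_natCast, h2, PySem.List.pyGetD_natCast,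
      List.getD_eq_getElem s 0 (by omega), List.getD_eq_getElem s 0 (by omega)]
    exact decide_eq_true (h i.toNat (by omega))

theorem ordenados_eq_sorted_cmp (s : List Int) :
    ordenados s = decide (s = PySem.List.sorted s (fun x => x) false) := by
  by_cases h : s = PySem.List.sorted s (fun x => x) false
  · rw [decide_eq_true h, ordenados_iff_chain', List.isChain_iff_pairwise]
    have hp := PySem.List.sorted_pairwise (xs := s) (key := fun x => x)
    rw [← h] at hp
    simpa using hp
  · rw [decide_eq_false h]
    by_contra hc
    have hb : ordenados s = true := by
      cases hord : ordenados s
      · simp [hord] at hc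
      · rfl
    rw [ordenados_iff_chain', List.isChain_iff_pairwise] at hb
    exact h (PySem.List.sorted_eq_self_of_pairwise s (fun x => x) (by simpa using hb)).symm

theorem foldl_if_eq_foldl_dec (l : List (List Int)) (acc : List Bool) :
    l.foldl (fun res fila =>
      if ¬ (ordenados fila) then res ++ [false] else res ++ [true]) acc =
    l.foldl (fun res fila =>
      res ++ [decide (fila = PySem.List.sorted fila (fun x => x) false)]) acc := by
  induction l generalizing acc with
  | nil => rfl
  | cons f t ih =>
    simp only [List.foldl_cons]
    rw [show (if ¬ (ordenados f) then acc ++ [false] else acc ++ [true]) =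
        acc ++ [decide (f = PySem.List.sorted f (fun x => x) false)] by
      rw [← ordenados_eq_sorted_cmp]
      by_cases h : ordenados f = true <;> simp [h]]
    exact ih _

-- ===== VERDICT (by name: the statement is the Claim_ definition above) =====
theorem filas_ordenadas_spec : Claim_equal_filas_ordenadas := by
  intro matriz _
  show filas_ordenadas matriz = filas_ordenadas_alt matriz
  unfold filas_ordenadas filas_ordenadas_alt
  rw [foldl_if_eq_foldl_dec]
  rw [PySem.List.foldl_append_singleton_eq_map]
  exact List.nil_append _
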